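-- pv_equiv track=rewrite | github.com/Aasthaengg/IBMdataset | Python_codes/p03324/s701003570.py | culc
-- ===== SOURCE A (Python) =====
-- def culc(x):
--     if x % 100 != 0:
--         return 0
--     else:
--         cnt = 0
--         while x % 100 == 0:
--             x //= 100
--             cnt +=1
--         return cnt
-- ===== SOURCE B (Python) =====
-- def culc(x):
--     def _val(x, p):
--         v = 0
--         while x % p == 0:
--             x //= p
--             v += 1
--         return v
--     return min(_val(x, 2) // 2, _val(x, 5) // 2)
-- ===== Notes on version B (the rewrite author's own statement) =====
-- stated objective: alternative
-- what changed: Instead of repeatedly dividing x by 100, B strips the prime factors 2 and 5 separately (one counting loop each) and returns min(v2//2, v5//2), using 100 = 2^2 * 5^2.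
import Mathlib
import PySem

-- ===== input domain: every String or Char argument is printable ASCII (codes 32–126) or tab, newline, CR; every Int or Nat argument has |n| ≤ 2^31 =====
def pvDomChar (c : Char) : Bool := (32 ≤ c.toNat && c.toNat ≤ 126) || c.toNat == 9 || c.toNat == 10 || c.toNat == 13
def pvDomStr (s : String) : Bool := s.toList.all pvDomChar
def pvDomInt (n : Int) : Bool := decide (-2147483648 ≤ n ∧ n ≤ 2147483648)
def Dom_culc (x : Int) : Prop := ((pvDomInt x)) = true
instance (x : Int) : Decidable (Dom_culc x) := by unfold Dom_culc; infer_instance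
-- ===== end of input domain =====

-- B strips the factors 2 and 5 separately and returns min(v2//2, v5//2); an alternative
-- decomposition of "how often does 100 divide x", not claimed faster.

-- ===== PORT A =====
-- while x % 100 == 0: x //= 100; cnt += 1   (fuel only makes the loop total; on x ≠ 0 it suffices)
def culcLoop : Nat → Int → Int → Int
  | 0, _, cnt => cnt
  | f + 1, x, cnt =>
    if PySem.Int.mod x 100 = 0 then culcLoop f (PySem.Int.floordiv x 100) (cnt + 1) else cnt

def culc (x : Int) : Int :=
  if PySem.Int.mod x 100 ≠ 0 then 0 else culcLoop (x.natAbs + 1) x 0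

-- ===== PORT B =====
-- helper _val(x, p): while x % p == 0: x //= p; v += 1   (fuel only makes the loop total)
def valLoop (p : Int) : Nat → Int → Int → Int
  | 0, _, v => v
  | f + 1, x, v =>
    if PySem.Int.mod x p = 0 then valLoop p f (PySem.Int.floordiv x p) (v + 1) else v

def culc_alt (x : Int) : Int :=
  min (PySem.Int.floordiv (valLoop 2 (x.natAbs + 1) x 0) 2)
      (PySem.Int.floordiv (valLoop 5 (x.natAbs + 1) x 0) 2)

-- ===== PRECONDITION & SPEC =====
-- Pre_ excludes x = 0, on which A's while-loop (and B's) never terminates.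
def Pre_culc (x : Int) : Prop := x ≠ 0
instance (x : Int) : Decidable (Pre_culc x) := by unfold Pre_culc; infer_instance
def pvWitness_culc : Int := 200

def Spec_culc (x : Int) (out : Int) : Prop := out = culc_alt x
instance (x : Int) (out : Int) : Decidable (Spec_culc x out) := by unfold Spec_culc; infer_instance

-- ===== CLAIM (what is proved, stated in full; the proofs are below) =====
def Claim_equal_culc : Prop := ∀ (x : Int), Dom_culc x → Pre_culc x → Spec_culc x (culc x)

-- ===== LEMMAS AND PROOFS =====

-- A's loop is B's helper loop with p = 100.
theorem culcLoop_eq_valLoop (fuel : Nat) (x cnt : Int) :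
    culcLoop fuel x cnt = valLoop 100 fuel x cnt := by
  induction fuel generalizing x cnt with
  | zero => rfl
  | succ f ih =>
    simp only [culcLoop, valLoop]
    split_ifs with h
    · exact ih _ _
    · rfl

-- The loop computes cnt plus the maximal k with p^k ∣ x.
theorem valLoop_spec (p : Int) (hp : 2 ≤ p) :
    ∀ (fuel : Nat) (x cnt : Int), x ≠ 0 → x.natAbs ≤ fuel →
      ∃ k : Nat, valLoop p fuel x cnt = cnt + k ∧ p ^ k ∣ x ∧ ¬ p ^ (k + 1) ∣ x := by
  intro fuel
  induction fuel with
  | zero => intro x cnt hx hf; omega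
  | succ f ih =>
    intro x cnt hx hf
    by_cases hdvd : p ∣ x
    · obtain ⟨y, hy⟩ := hdvd
      have hp0 : p ≠ 0 := by omega
      have hy0 : y ≠ 0 := by rintro rfl; simp at hy; omega
      have hfd : PySem.Int.floordiv x p = y := by
        rw [PySem.Int.floordiv_eq_ediv_of_pos (by omega : (0:Int) < p), hy,
          Int.mul_ediv_cancel_left _ hp0]
      have habs : x.natAbs = p.natAbs * y.natAbs := by rw [hy, Int.natAbs_mul]
      have hyf : y.natAbs ≤ f := by
        have h2 : 2 ≤ p.natAbs := by omega
        have := Nat.one_le_iff_ne_zero.mpr (Int.natAbs_ne_zero.mpr hy0)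
        nlinarith
      obtain ⟨k, hk1, hk2, hk3⟩ := ih y (cnt + 1) hy0 hyf
      refine ⟨k + 1, ?_, ?_, ?_⟩
      · simp only [valLoop, (PySem.Int.mod_eq_zero_iff_dvd x p).mpr ⟨y, hy⟩, hfd]
        rw [hk1]; push_cast; ring
      · rw [hy, pow_succ, mul_comm (p ^ k) p]
        exact mul_dvd_mul_left p hk2
      · intro hcon
        apply hk3
        rw [hy, pow_succ, pow_succ, mul_comm (p ^ k * p) p, mul_comm (p ^ k) p] at hcon
        have := (mul_dvd_mul_iff_left hp0).mp hcon
        rwa [← pow_succ'] at this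
    · refine ⟨0, ?_, by simp, by simpa using hdvd⟩
      have : PySem.Int.mod x p ≠ 0 := fun h => hdvd ((PySem.Int.mod_eq_zero_iff_dvd x p).mp h)
      simp [valLoop, this]

-- 100^k ∣ x ↔ 2^(2k) ∣ x ∧ 5^(2k) ∣ x, packaged as: the three maximal exponents are linked.
theorem hundred_pow (m : Nat) : (100 : Int) ^ m = 2 ^ (2 * m) * 5 ^ (2 * m) := by
  rw [pow_mul, pow_mul, ← mul_pow]; norm_num

theorem min_halves (x : Int) (k2 k5 k100 : Nat)
    (h2 : (2:Int) ^ k2 ∣ x) (h2' : ¬ (2:Int) ^ (k2 + 1) ∣ x)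
    (h5 : (5:Int) ^ k5 ∣ x) (h5' : ¬ (5:Int) ^ (k5 + 1) ∣ x)
    (h1 : (100:Int) ^ k100 ∣ x) (h1' : ¬ (100:Int) ^ (k100 + 1) ∣ x) :
    min (k2 / 2) (k5 / 2) = k100 := by
  have hcop : IsCoprime ((2:Int) ^ (2 * min (k2 / 2) (k5 / 2)))
      ((5:Int) ^ (2 * min (k2 / 2) (k5 / 2))) := by
    apply IsCoprime.pow
    rw [Int.isCoprime_iff_gcd_eq_one]; decide
  have hub : min (k2 / 2) (k5 / 2) ≤ k100 := by
    by_contra hlt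
    apply h1'
    have hdvd : (100 : Int) ^ min (k2 / 2) (k5 / 2) ∣ x := by
      rw [hundred_pow]
      exact hcop.mul_dvd
        (dvd_trans (pow_dvd_pow 2 (by omega)) h2)
        (dvd_trans (pow_dvd_pow 5 (by omega)) h5)
    exact dvd_trans (pow_dvd_pow 100 (by omega)) hdvd
  have hk2 : 2 * k100 ≤ k2 := by
    by_contra hlt
    apply h2'
    refine dvd_trans (pow_dvd_pow 2 (show k2 + 1 ≤ 2 * k100 by omega)) (dvd_trans ?_ h1)
    rw [hundred_pow]; exact dvd_mul_right _ _
  have hk5 : 2 * k100 ≤ k5 := by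
    by_contra hlt
    apply h5'
    refine dvd_trans (pow_dvd_pow 5 (show k5 + 1 ≤ 2 * k100 by omega)) (dvd_trans ?_ h1)
    rw [hundred_pow]; exact dvd_mul_left _ _
  omega

-- ===== VERDICT (by name: the statement is the Claim_ definition above) =====
theorem culc_spec : Claim_equal_culc := by
  intro x _ hx
  unfold Spec_culc culc culc_alt
  obtain ⟨k2, e2, h2, h2'⟩ := valLoop_spec 2 (by norm_num) (x.natAbs + 1) x 0 hx (by omega)
  obtain ⟨k5, e5, h5, h5'⟩ := valLoop_spec 5 (by norm_num) (x.natAbs + 1) x 0 hx (by omega)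
  rw [e2, e5, zero_add, zero_add]
  have hdiv : ∀ k : Nat, PySem.Int.floordiv (k : Int) 2 = ((k / 2 : Nat) : Int) := by
    intro k
    rw [PySem.Int.floordiv_eq_ediv_of_pos (by norm_num)]
    exact (Nat.ToInt.div_congr rfl rfl).symm
  rw [hdiv, hdiv, ← Nat.cast_min]
  by_cases hmod : PySem.Int.mod x 100 = 0
  · simp only [hmod, ne_eq, not_true_eq_false, if_false]
    rw [culcLoop_eq_valLoop]
    obtain ⟨k100, e100, h100, h100'⟩ :=
      valLoop_spec 100 (by norm_num) (x.natAbs + 1) x 0 hx (by omega)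
    rw [e100, zero_add, min_halves x k2 k5 k100 h2 h2' h5 h5' h100 h100']
  · simp only [hmod, ne_eq, not_false_eq_true, if_true]
    have h100' : ¬ (100:Int) ^ (0 + 1) ∣ x := by
      simpa using fun h => hmod ((PySem.Int.mod_eq_zero_iff_dvd x 100).mpr h)
    rw [min_halves x k2 k5 0 h2 h2' h5 h5' (by simp) h100']
    rfl
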